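-- pv_equiv track=rewrite | github.com/rishab-t0910/projecteuler | Problem 23.py | properdiv
-- ===== SOURCE A (Python) =====
-- def properdiv(x):
--     tot = 0
--     for i in range(1, x):
--         if x%i == 0:
--             tot += i
--
--     if tot>x:
--         return 1 #abundant
--     else:
--         return 2 #fuck knows
-- ===== SOURCE B (Python) =====
-- def properdiv(x):
--     s = 0
--     i = 1
--     while i * i <= x:
--         if x % i == 0:
--             s += i
--             j = x // i
--             if j != i and j != x:
--                 s += j
--         i += 1
--     return 1 if s > x else 2
-- ===== Notes on version B (the rewrite author's own statement) =====
-- stated objective: faster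
-- what changed: B replaces A's scan of every candidate i in range(1, x) by trial division only up to sqrt(x), adding each small divisor together with its cofactor x//i (skipping x itself), so the divisor sum is computed in O(sqrt(x)) iterations.
import Mathlib
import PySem

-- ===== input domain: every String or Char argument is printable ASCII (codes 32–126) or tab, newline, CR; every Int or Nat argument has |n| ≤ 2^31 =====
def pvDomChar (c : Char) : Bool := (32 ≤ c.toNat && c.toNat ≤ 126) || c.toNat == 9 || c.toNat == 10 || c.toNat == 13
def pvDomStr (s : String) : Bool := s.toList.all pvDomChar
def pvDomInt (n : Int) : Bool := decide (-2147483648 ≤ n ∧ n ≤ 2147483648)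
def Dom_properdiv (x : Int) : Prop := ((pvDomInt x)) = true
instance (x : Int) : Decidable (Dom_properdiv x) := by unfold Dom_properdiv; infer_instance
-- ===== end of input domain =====

-- B sums the proper divisors by trial division only up to sqrt(x), adding each small divisor
-- together with its cofactor x//i, instead of A's scan over every i in range(1, x).

-- ===== PORT A =====
def properdiv (x : Int) : Int :=
  let tot := (PySem.List.pyRange 1 x 1).foldl
    (fun tot i => if PySem.Int.mod x i = 0 then tot + i else tot) 0
  if tot > x then 1 else 2

-- ===== PORT B =====
-- the while loop of Source B: i climbs while i*i <= x, accumulating s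
def properdivAltLoop (x i s : Int) : Int :=
  if h : i * i ≤ x then
    properdivAltLoop x (i + 1)
      (if PySem.Int.mod x i = 0 then
        (let j := PySem.Int.floordiv x i
         if j ≠ i ∧ j ≠ x then (s + i) + j else s + i)
       else s)
  else s
termination_by (x + 1 - i).toNat
decreasing_by
  have hx : 0 ≤ x := le_trans (mul_self_nonneg i) h
  have hi : i ≤ x := by nlinarith [sq_nonneg (i - 1)]
  omega

def properdiv_alt (x : Int) : Int :=
  let s := properdivAltLoop x 1 0
  if s > x then 1 else 2

-- ===== PRECONDITION & SPEC =====
def Spec_properdiv (x : Int) (out : Int) : Prop := out = properdiv_alt x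
instance (x : Int) (out : Int) : Decidable (Spec_properdiv x out) := by unfold Spec_properdiv; infer_instance

-- ===== CLAIM (what is proved, stated in full; the proofs are below) =====
def Claim_equal_properdiv : Prop := ∀ (x : Int), Dom_properdiv x → Spec_properdiv x (properdiv x)

-- ===== LEMMAS AND PROOFS =====

theorem pvSumSplit (f : Int → Int) {a b c : Int} (h1 : a ≤ b) (h2 : b ≤ c) :
    ∑ i ∈ Finset.Ico a c, f i = ∑ i ∈ Finset.Ico a b, f i + ∑ i ∈ Finset.Ico b c, f i := by
  rw [← Finset.Ico_union_Ico_eq_Ico h1 h2,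
      Finset.sum_union (Finset.Ico_disjoint_Ico_consecutive a b c)]

def pvContrib (x k : Int) : Int :=
  if k ∣ x then k + (if x / k ≠ k ∧ x / k ≠ x then x / k else 0) else 0

theorem pvFoldlA (x : Int) (n : Nat) :
    (PySem.List.pyRange 1 (1 + (n : Int)) 1).foldl
      (fun tot i => if PySem.Int.mod x i = 0 then tot + i else tot) 0
    = ∑ k ∈ Finset.Ico (1 : Int) (1 + (n : Int)), (if k ∣ x then k else 0) := by
  induction n with
  | zero => rw [show ((0:Nat):Int) = 0 by rfl]; rw [PySem.List.pyRange_one_eq_nil (by omega)]; simp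
  | succ n ih =>
    rw [show (1 + ((n+1 : Nat) : Int)) = (1 + (n:Int)) + 1 by push_cast; ring]
    rw [PySem.List.pyRange_one_succ_right (by omega : (1:Int) ≤ 1 + (n:Int))]
    rw [List.foldl_append, ih]
    simp only [List.foldl_cons, List.foldl_nil]
    rw [show ∑ k ∈ Finset.Ico (1 : Int) (1 + (n:Int) + 1), (if k ∣ x then k else 0)
          = ∑ k ∈ Finset.Ico (1 : Int) (1 + (n:Int)), (if k ∣ x then k else 0)
            + ∑ k ∈ Finset.Ico (1 + (n:Int)) (1 + (n:Int) + 1), (if k ∣ x then k else 0)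
        from pvSumSplit _ (by omega) (by omega)]
    rw [Finset.Ico_add_one_right_eq_Icc, Finset.Icc_self, Finset.sum_singleton]
    simp only [PySem.Int.mod_eq_zero_iff_dvd]
    split_ifs <;> ring

theorem pvLoopInv (x r : Int) (h1 : r * r ≤ x) (h2 : x < (r + 1) * (r + 1)) :
    ∀ (n : Nat) (i s : Int), 1 ≤ i → (r + 1 - i).toNat = n →
      properdivAltLoop x i s = s + ∑ k ∈ Finset.Ico i (r + 1), pvContrib x k := by
  intro n
  induction n with
  | zero =>
    intro i s hi hn
    have hri : r + 1 ≤ i := by omega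
    rw [properdivAltLoop, dif_neg (by nlinarith : ¬ i * i ≤ x)]
    rw [Finset.Ico_eq_empty (by omega), Finset.sum_empty, add_zero]
  | succ n ih =>
    intro i s hi hn
    have hir : i ≤ r := by omega
    have hguard : i * i ≤ x := by nlinarith
    rw [properdivAltLoop, dif_pos hguard, ih (i + 1) _ (by omega) (by omega)]
    rw [show ∑ k ∈ Finset.Ico i (r + 1), pvContrib x k
          = ∑ k ∈ Finset.Ico i (i + 1), pvContrib x k
            + ∑ k ∈ Finset.Ico (i + 1) (r + 1), pvContrib x k
        from pvSumSplit _ (by omega) (by omega)]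
    rw [show ∑ k ∈ Finset.Ico i (i + 1), pvContrib x k = pvContrib x i by
          rw [Finset.Ico_add_one_right_eq_Icc, Finset.Icc_self, Finset.sum_singleton]]
    unfold pvContrib
    simp only [PySem.Int.mod_eq_zero_iff_dvd,
      PySem.Int.floordiv_eq_ediv_of_pos (show (0:Int) < i by omega)]
    split_ifs <;> ring

-- exact-division facts for a positive divisor d of a positive x
theorem pvCofactor {x d : Int} (hx : 0 < x) (hd : 0 < d) (hdvd : d ∣ x) :
    x / d ∣ x ∧ 0 < x / d ∧ d * (x / d) = x ∧ x / (x / d) = d := by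
  obtain ⟨c, hc⟩ := hdvd
  have hcd : x / d = c := by rw [hc]; exact Int.mul_ediv_cancel_left c (by omega)
  have hc0 : 0 < c := by nlinarith
  have hxc : x / c = d := by
    rw [hc, mul_comm]; exact Int.mul_ediv_cancel_left d (by omega)
  refine ⟨⟨d, by rw [hcd, hc]; ring⟩, by omega, by rw [hcd]; omega, by rw [hcd, hxc]⟩

theorem pvPairing (x r : Int) (hx : 2 ≤ x) (hr : 1 ≤ r)
    (h1 : r * r ≤ x) (h2 : x < (r + 1) * (r + 1)) :
    ∑ k ∈ Finset.Ico (1 : Int) x, (if k ∣ x then k else 0)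
    = ∑ k ∈ Finset.Ico (1 : Int) (r + 1), pvContrib x k := by
  have hrx : r + 1 ≤ x := by nlinarith
  rw [show ∑ k ∈ Finset.Ico (1 : Int) x, (if k ∣ x then k else 0)
        = ∑ k ∈ Finset.Ico (1 : Int) (r + 1), (if k ∣ x then k else 0)
          + ∑ k ∈ Finset.Ico (r + 1) x, (if k ∣ x then k else 0)
      from pvSumSplit _ (by omega) hrx]
  have hsplit : ∀ k ∈ Finset.Ico (1 : Int) (r + 1), pvContrib x k
      = (if k ∣ x then k else 0)
        + (if k ∣ x ∧ x / k ≠ k ∧ x / k ≠ x then x / k else 0) := by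
    intro k _
    unfold pvContrib
    by_cases hd : k ∣ x <;> simp [hd]
  rw [Finset.sum_congr rfl hsplit, Finset.sum_add_distrib]
  congr 1
  rw [← Finset.sum_filter (fun k => k ∣ x) (fun k => k),
      ← Finset.sum_filter (fun k => k ∣ x ∧ x / k ≠ k ∧ x / k ≠ x) (fun k => x / k)]
  refine Finset.sum_nbij' (i := fun d => x / d) (j := fun k => x / k) ?_ ?_ ?_ ?_ ?_
  · -- forward: a big divisor maps to a small one with the side conditions
    intro d hd
    simp only [Finset.mem_filter, Finset.mem_Ico] at hd ⊢
    obtain ⟨⟨hdl, hdu⟩, hdvd⟩ := hd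
    obtain ⟨hcdvd, hc0, hmul, hback⟩ := pvCofactor (by omega) (by omega) hdvd
    have hsmall : x / d < r + 1 := by
      rcases lt_or_ge (x / d) (r + 1) with h | hge
      · exact h
      · exfalso
        nlinarith [mul_le_mul hdl hge (by omega : (0:Int) ≤ r + 1) (by omega : (0:Int) ≤ d)]
    refine ⟨⟨by omega, hsmall⟩, hcdvd, by rw [hback]; omega, by rw [hback]; omega⟩
  · -- backward: a small divisor with the side conditions maps to a big one
    intro k hk
    simp only [Finset.mem_filter, Finset.mem_Ico] at hk ⊢
    obtain ⟨⟨hkl, hku⟩, hkdvd, hne1, hne2⟩ := hk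
    obtain ⟨hcdvd, hc0, hmul, hback⟩ := pvCofactor (by omega) (by omega) hkdvd
    have hlt : x / k < x := by
      have := Int.le_of_dvd (by omega) hcdvd
      omega
    refine ⟨⟨?_, hlt⟩, hcdvd⟩
    -- r + 1 ≤ x / k
    rcases lt_or_ge (x / k) (r + 1) with hsm | hok
    swap
    · exact hok
    exfalso
    rcases lt_trichotomy (x / k) k with hck | hck | hck
    · nlinarith [mul_le_mul (show k ≤ r by omega) (show x / k ≤ k - 1 by omega)
          (by omega : (0:Int) ≤ x / k) (by omega : (0:Int) ≤ r),
        mul_le_mul_of_nonneg_left (show k - 1 ≤ r - 1 by omega) (by omega : (0:Int) ≤ r)]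
    · exact hne1 hck
    · nlinarith [mul_le_mul (show k ≤ x / k - 1 by omega) (show x / k ≤ r by omega)
          (by omega : (0:Int) ≤ x / k) (show (0:Int) ≤ x / k - 1 by omega),
        mul_le_mul_of_nonneg_right (show x / k - 1 ≤ r - 1 by omega) (by omega : (0:Int) ≤ r)]
  · intro d hd
    simp only [Finset.mem_filter, Finset.mem_Ico] at hd
    obtain ⟨⟨hdl, hdu⟩, hdvd⟩ := hd
    exact (pvCofactor (by omega) (by omega) hdvd).2.2.2
  · intro k hk
    simp only [Finset.mem_filter, Finset.mem_Ico] at hk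
    obtain ⟨⟨hkl, hku⟩, hkdvd, _, _⟩ := hk
    exact (pvCofactor (by omega) (by omega) hkdvd).2.2.2
  · intro d hd
    simp only [Finset.mem_filter, Finset.mem_Ico] at hd
    obtain ⟨⟨hdl, hdu⟩, hdvd⟩ := hd
    exact ((pvCofactor (by omega) (by omega) hdvd).2.2.2).symm

-- ===== VERDICT (by name: the statement is the Claim_ definition above) =====
theorem properdiv_spec : Claim_equal_properdiv := by
  intro x _
  unfold Spec_properdiv properdiv properdiv_alt
  rcases lt_trichotomy x 1 with hx | hx | hx
  · -- x ≤ 0: both loops are empty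
    rw [PySem.List.pyRange_one_eq_nil (by omega), properdivAltLoop]
    simp only [List.foldl_nil]
    rw [dif_neg (by nlinarith [sq_nonneg (1 : Int)])]
    rfl
  · -- x = 1: the range is empty and the loop runs once (i = 1), adding 1; both compare ≤ and return 2
    subst hx
    have hB := pvLoopInv 1 1 (by norm_num) (by norm_num) 1 1 0 le_rfl (by norm_num)
    show (if (PySem.List.pyRange 1 1 1).foldl
        (fun tot i => if PySem.Int.mod 1 i = 0 then tot + i else tot) 0 > 1 then (1:Int) else 2)
      = if properdivAltLoop 1 1 0 > 1 then 1 else 2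
    rw [hB, PySem.List.pyRange_one_eq_nil le_rfl,
        show ((2:Int) = 1 + 1) from rfl, Finset.Ico_add_one_right_eq_Icc, Finset.Icc_self,
        Finset.sum_singleton]
    norm_num [pvContrib]
  · -- x ≥ 2
    have hx2 : 2 ≤ x := by omega
    set r : Int := ((Nat.sqrt x.toNat : Nat) : Int) with hrdef
    have h1 : r * r ≤ x := by
      have h := Nat.sqrt_le' x.toNat
      have h' : ((x.toNat.sqrt * x.toNat.sqrt : Nat) : Int) ≤ ((x.toNat : Nat) : Int) := by
        exact_mod_cast (by nlinarith : x.toNat.sqrt * x.toNat.sqrt ≤ x.toNat)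
      rw [hrdef]
      push_cast at h' ⊢
      omega
    have h2 : x < (r + 1) * (r + 1) := by
      have h := Nat.lt_succ_sqrt' x.toNat
      have h' : ((x.toNat : Nat) : Int) < (((x.toNat.sqrt + 1) * (x.toNat.sqrt + 1) : Nat) : Int) := by
        exact_mod_cast (by nlinarith : x.toNat < (x.toNat.sqrt + 1) * (x.toNat.sqrt + 1))
      rw [hrdef]
      push_cast at h' ⊢
      omega
    have hr : 1 ≤ r := by
      rw [hrdef]
      have : 0 < x.toNat.sqrt := Nat.sqrt_pos.mpr (by omega)
      omega
    have hA : (PySem.List.pyRange 1 x 1).foldl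
        (fun tot i => if PySem.Int.mod x i = 0 then tot + i else tot) 0
        = ∑ k ∈ Finset.Ico (1 : Int) x, (if k ∣ x then k else 0) := by
      have h := pvFoldlA x (x - 1).toNat
      rw [show (1 + ((x - 1).toNat : Int)) = x by omega] at h
      exact h
    have hB : properdivAltLoop x 1 0 = ∑ k ∈ Finset.Ico (1 : Int) (r + 1), pvContrib x k := by
      have h := pvLoopInv x r h1 h2 r.toNat 1 0 le_rfl (by omega)
      simpa using h
    show (if (PySem.List.pyRange 1 x 1).foldl
        (fun tot i => if PySem.Int.mod x i = 0 then tot + i else tot) 0 > x then (1:Int) else 2)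
      = if properdivAltLoop x 1 0 > x then 1 else 2
    rw [hA, hB, pvPairing x r hx2 hr h1 h2]
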